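-- pv_equiv track=rewrite | github.com/marcarvar/riws-vademecum | flask/interfaz.py | checked_alertas
-- ===== SOURCE A (Python) =====
-- def checked_alertas(inputs):
-- 	checks = ['', '', '', '']
-- 	for alerta in inputs['alertas_comp']:
-- 		if alerta == 'Lactancia':
-- 			checks[0] = 'checked'
-- 		elif alerta == 'Embarazo':
-- 			checks[1] = 'checked'
-- 		elif alerta == 'Fotosensibilidad':
-- 			checks[2] = 'checked'
-- 		elif alerta == 'Conducción de vehículos/maquinaria':
-- 			checks[3] = 'checked'
-- 	inputs['alertas_comp'] = checks
-- 	return inputs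
-- ===== SOURCE B (Python) =====
-- def checked_alertas(inputs):
-- 	keys = ['Lactancia', 'Embarazo', 'Fotosensibilidad', 'Conducción de vehículos/maquinaria']
-- 	present = set(inputs['alertas_comp'])
-- 	inputs['alertas_comp'] = ['checked' if k in present else '' for k in keys]
-- 	return inputs
-- ===== Notes on version B (the rewrite author's own statement) =====
-- stated objective: simpler
-- what changed: Instead of scanning the alert list and dispatching through a four-way if/elif chain that mutates a checks array, B iterates over the fixed key list and builds the checks list by a membership test against a set of the present alerts.
-- outside the precondition, e.g. on checked_alertas({}): A raises KeyError, B raises KeyError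
import Mathlib
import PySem

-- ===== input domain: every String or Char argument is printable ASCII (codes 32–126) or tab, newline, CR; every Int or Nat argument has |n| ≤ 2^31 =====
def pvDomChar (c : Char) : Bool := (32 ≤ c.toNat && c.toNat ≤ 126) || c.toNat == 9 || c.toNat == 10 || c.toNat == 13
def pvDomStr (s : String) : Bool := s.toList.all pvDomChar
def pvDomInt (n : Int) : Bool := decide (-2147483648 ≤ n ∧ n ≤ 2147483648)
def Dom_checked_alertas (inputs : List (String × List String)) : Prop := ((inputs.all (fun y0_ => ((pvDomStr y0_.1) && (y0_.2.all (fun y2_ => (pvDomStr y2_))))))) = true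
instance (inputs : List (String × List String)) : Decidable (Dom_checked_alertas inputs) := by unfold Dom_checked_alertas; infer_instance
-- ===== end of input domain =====

-- B replaces A's scan of the alerts with an if/elif chain by a comprehension over the
-- fixed four-key list using a membership test; same result, plainer shape.

-- ===== PORT A =====
-- one step of A's for-loop over inputs['alertas_comp'], mutating checks in place
def caStep (checks : List String) (alerta : String) : List String :=
  if alerta == "Lactancia" then checks.set 0 "checked"
  else if alerta == "Embarazo" then checks.set 1 "checked"
  else if alerta == "Fotosensibilidad" then checks.set 2 "checked"
  else if alerta == "Conducción de vehículos/maquinaria" then checks.set 3 "checked"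
  else checks

def checked_alertas (inputs : List (String × List String)) : List (String × List String) :=
  match (PySem.Dict.mk inputs).get? "alertas_comp" with
  | none => []  -- unreachable under Pre_: Python raises KeyError here
  | some alertas =>
      let checks := alertas.foldl caStep ["", "", "", ""]
      ((PySem.Dict.mk inputs).insert "alertas_comp" checks).items

-- ===== PORT B =====
def caKeys : List String :=
  ["Lactancia", "Embarazo", "Fotosensibilidad", "Conducción de vehículos/maquinaria"]

def checked_alertas_alt (inputs : List (String × List String)) : List (String × List String) :=
  match (PySem.Dict.mk inputs).get? "alertas_comp" with
  | none => []  -- unreachable under Pre_: Python raises KeyError here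
  | some alertas =>
      let present : PySem.Set String := PySem.Set.ofList alertas
      let checks := caKeys.map (fun k => if PySem.Set.contains present k then "checked" else "")
      ((PySem.Dict.mk inputs).insert "alertas_comp" checks).items

-- ===== PRECONDITION & SPEC =====
-- Pre_ excludes only dicts lacking the key 'alertas_comp', on which A (and B) raise KeyError.
def Pre_checked_alertas (inputs : List (String × List String)) : Prop :=
  (PySem.Dict.mk inputs).contains "alertas_comp" = true
instance (inputs : List (String × List String)) : Decidable (Pre_checked_alertas inputs) := by
  unfold Pre_checked_alertas; infer_instance

def pvWitness_checked_alertas : (List (String × List String)) :=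
  [("alertas_comp", ["Embarazo", "x"])]

def Spec_checked_alertas (inputs : List (String × List String)) (out : List (String × List String)) : Prop := out = checked_alertas_alt inputs
instance (inputs : List (String × List String)) (out : List (String × List String)) : Decidable (Spec_checked_alertas inputs out) := by unfold Spec_checked_alertas; infer_instance

-- ===== CLAIM (what is proved, stated in full; the proofs are below) =====
def Claim_equal_checked_alertas : Prop := ∀ (inputs : List (String × List String)), Dom_checked_alertas inputs → Pre_checked_alertas inputs → Spec_checked_alertas inputs (checked_alertas inputs)

-- ===== LEMMAS AND PROOFS =====

-- A's loop leaves, at each of the four positions, 'checked' iff the corresponding key occurs.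
lemma foldl_caStep (l : List String) (a b c d : String) :
    l.foldl caStep [a, b, c, d] =
      [(if "Lactancia" ∈ l then "checked" else a),
       (if "Embarazo" ∈ l then "checked" else b),
       (if "Fotosensibilidad" ∈ l then "checked" else c),
       (if "Conducción de vehículos/maquinaria" ∈ l then "checked" else d)] := by
  induction l generalizing a b c d with
  | nil => simp
  | cons h t ih =>
    by_cases h1 : h = "Lactancia"
    · subst h1; simp [caStep, List.foldl_cons, ih, List.mem_cons]
    · by_cases h2 : h = "Embarazo"
      · subst h2; simp [caStep, List.foldl_cons, ih, List.mem_cons]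
      · by_cases h3 : h = "Fotosensibilidad"
        · subst h3; simp [caStep, List.foldl_cons, ih, List.mem_cons]
        · by_cases h4 : h = "Conducción de vehículos/maquinaria"
          · subst h4; simp [caStep, List.foldl_cons, ih, List.mem_cons]
          · simp [caStep, h1, h2, h3, h4, List.foldl_cons, ih, List.mem_cons,
              fun s => (Ne.symm · : h ≠ s → s ≠ h)]

lemma checks_eq (alertas : List String) :
    alertas.foldl caStep ["", "", "", ""] =
      caKeys.map (fun k => if PySem.Set.contains (PySem.Set.ofList alertas) k then "checked" else "") := by
  rw [foldl_caStep]
  simp [caKeys, PySem.Set.contains, PySem.Set.mem_ofList]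

-- ===== VERDICT (by name: the statement is the Claim_ definition above) =====
theorem checked_alertas_spec : Claim_equal_checked_alertas := by
  intro inputs _ _
  unfold Spec_checked_alertas checked_alertas checked_alertas_alt
  cases h : (PySem.Dict.mk inputs).get? "alertas_comp" with
  | none => rfl
  | some alertas => simp [checks_eq alertas]
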